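-- pv_equiv track=rewrite | github.com/HongyuHe/anuta | anuta/tree.py | _merge_rules_by_premise
-- ===== SOURCE A (Python) =====
-- from typing import Iterable, Set
--
-- from collections import defaultdict
--
-- def _merge_rules_by_premise(rules: Iterable[str]) -> Set[str]:
--     """Combine rules with identical premises into a single rule with OR-ed conclusions."""
--     grouped: Dict[str, Set[str]] = defaultdict(set)
--     for rule in rules:
--         if '>>' not in rule:
--             # Skip malformed entries such as the prior sentinel values.
--             continue
--         premise, conclusion = rule.split('>>', 1)
--         grouped[premise.strip()].add(conclusion.strip())
--
--     merged_rules: Set[str] = set()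
--     for premise, conclusions in grouped.items():
--         if len(conclusions) == 1:
--             conclusion = next(iter(conclusions))
--         else:
--             conclusion = f"( {' | '.join(sorted(conclusions))} )"
--         merged_rules.add(f"{premise} >> {conclusion}")
--     return merged_rules
-- ===== SOURCE B (Python) =====
-- from typing import Iterable, Set
--
--
-- def _merge_rules_by_premise(rules: Iterable[str]) -> Set[str]:
--     """Combine rules with identical premises into a single rule with OR-ed conclusions."""
--     pairs = []
--     for rule in rules:
--         if '>>' in rule:
--             premise, conclusion = rule.split('>>', 1)
--             pairs.append((premise.strip(), conclusion.strip()))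
--
--     premises = []
--     for premise, _ in pairs:
--         if premise not in premises:
--             premises.append(premise)
--
--     merged_rules: Set[str] = set()
--     for premise in premises:
--         conclusions = []
--         for q, conclusion in pairs:
--             if q == premise and conclusion not in conclusions:
--                 conclusions.append(conclusion)
--         if len(conclusions) == 1:
--             text = conclusions[0]
--         else:
--             text = f"( {' | '.join(sorted(conclusions))} )"
--         merged_rules.add(f"{premise} >> {text}")
--     return merged_rules
-- ===== Notes on version B (the rewrite author's own statement) =====
-- stated objective: alternative
-- what changed: Replaces A's one-pass defaultdict(set) grouping with a two-stage decomposition: parse all rules into (premise, conclusion) pairs, dedupe premises by first occurrence, then gather each premise's conclusions by a per-premise scan over the pair list (no dict at all).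
import Mathlib
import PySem

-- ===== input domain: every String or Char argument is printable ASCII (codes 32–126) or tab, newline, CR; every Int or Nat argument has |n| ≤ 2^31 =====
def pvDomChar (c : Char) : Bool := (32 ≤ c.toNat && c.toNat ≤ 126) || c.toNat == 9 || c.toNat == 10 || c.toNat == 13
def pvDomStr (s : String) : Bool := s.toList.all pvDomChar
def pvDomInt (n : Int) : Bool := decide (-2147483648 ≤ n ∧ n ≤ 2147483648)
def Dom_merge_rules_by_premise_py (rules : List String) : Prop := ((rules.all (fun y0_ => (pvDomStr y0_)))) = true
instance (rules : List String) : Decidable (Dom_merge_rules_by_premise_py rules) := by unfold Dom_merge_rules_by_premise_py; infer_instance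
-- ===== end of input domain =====

-- B replaces A's defaultdict grouping by an explicit first-occurrence premise list plus a
-- per-premise scan over the parsed pairs (alternative decomposition; not claimed faster).


-- shared helper: "if '>>' in rule: p, c = rule.split('>>', 1)" with both parts stripped
-- (both Pythons perform exactly this parse; splitMax? is exact for str.split(sep, 1))
def pvParse (rule : String) : Option (String × String) :=
  if PySem.Str.isIn ">>" rule then
    match PySem.Str.splitMax? rule ">>" 1 with
    | some (p :: c :: _) => some (PySem.Str.strip p, PySem.Str.strip c)
    | _ => none
  else none

-- ===== PORT A =====
def merge_rules_by_premise_py (rules : List String) : List String :=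
  let grouped : PySem.Dict String (List String) :=
    rules.foldl (fun d rule =>
      match pvParse rule with
      | some pc => d.modify pc.1 [] (fun s => PySem.Set.add s pc.2)   -- grouped[p].add(c), defaultdict(set)
      | none => d)                                                     -- continue
      PySem.Dict.empty
  grouped.items.foldl (fun merged pc =>
    let conclusion :=
      if pc.2.length == 1 then pc.2.headD ""                           -- next(iter(conclusions))
      else "( " ++ PySem.Str.join " | " (PySem.List.sorted pc.2 (fun x => x) false) ++ " )"
    PySem.Set.add merged (pc.1 ++ " >> " ++ conclusion)) []

-- ===== PORT B =====
def merge_rules_by_premise_py_alt (rules : List String) : List String :=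
  let pairs : List (String × String) :=
    rules.foldl (fun acc rule =>
      match pvParse rule with
      | some pc => acc ++ [pc]
      | none => acc) []
  let premises : List String :=
    pairs.foldl (fun ps pc => if pc.1 ∈ ps then ps else ps ++ [pc.1]) []
  premises.foldl (fun merged p =>
    let conclusions : List String :=
      pairs.foldl (fun cs qc =>
        if qc.1 == p && !(cs.contains qc.2) then cs ++ [qc.2] else cs) []
    let text :=
      if conclusions.length == 1 then PySem.List.pyGetD conclusions 0 ""   -- conclusions[0], guarded by len == 1
      else "( " ++ PySem.Str.join " | " (PySem.List.sorted conclusions (fun x => x) false) ++ " )"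
    PySem.Set.add merged (p ++ " >> " ++ text)) []

-- ===== PRECONDITION & SPEC =====
def Spec_merge_rules_by_premise_py (rules : List String) (out : List String) : Prop := out = merge_rules_by_premise_py_alt rules
instance (rules : List String) (out : List String) : Decidable (Spec_merge_rules_by_premise_py rules out) := by unfold Spec_merge_rules_by_premise_py; infer_instance

-- ===== CLAIM (what is proved, stated in full; the proofs are below) =====
def Claim_equal_merge_rules_by_premise_py : Prop := ∀ (rules : List String), Dom_merge_rules_by_premise_py rules → Spec_merge_rules_by_premise_py rules (merge_rules_by_premise_py rules)

-- ===== LEMMAS AND PROOFS =====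

-- a fold that handles each rule through `pvParse`-match is the fold over the parsed pairs
theorem foldl_pvParse_match {γ : Type} (g : γ → String × String → γ) :
    ∀ (l : List String) (init : γ),
      l.foldl (fun acc rule => match pvParse rule with
                               | some pc => g acc pc
                               | none => acc) init
        = (l.filterMap pvParse).foldl g init := by
  intro l
  induction l with
  | nil => intro init; rfl
  | cons r t ih =>
    intro init
    cases h : pvParse r <;> simp [h, ih]

-- the grouping loop's entry at key k: the conclusions of k's pairs, set-added in order
theorem getD_group_foldl (l : List (String × String)) :
    ∀ (d : PySem.Dict String (List String)) (k : String),
      ((l.foldl (fun d pc => d.modify pc.1 [] (fun s => PySem.Set.add s pc.2)) d).getD k [])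
        = ((l.filter (fun pc => pc.1 == k)).map (·.2)).foldl PySem.Set.add (d.getD k []) := by
  induction l with
  | nil => intro d k; rfl
  | cons pc t ih =>
    intro d k
    rw [List.foldl_cons, ih, List.filter_cons]
    by_cases hk : pc.1 = k
    · subst hk
      rw [PySem.Dict.getD_modify_self]
      simp
    · rw [PySem.Dict.getD_modify_of_ne d [] _ (Ne.symm hk)]
      simp [hk]

-- B's inner scan over the pairs is the same set-add fold over k's conclusions
theorem inner_scan_eq (p : String) (l : List (String × String)) (cs : List String) :
    l.foldl (fun cs qc => if qc.1 == p && !(cs.contains qc.2) then cs ++ [qc.2] else cs) cs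
      = ((l.filter (fun qc => qc.1 == p)).map (·.2)).foldl PySem.Set.add cs := by
  have hstep : (fun (cs : List String) (qc : String × String) =>
        if qc.1 == p && !(cs.contains qc.2) then cs ++ [qc.2] else cs)
      = (fun cs qc => if qc.1 == p then PySem.Set.add cs qc.2 else cs) := by
    funext cs qc
    by_cases hq : qc.1 = p
    · by_cases hm : qc.2 ∈ cs
      · simp [hq, hm]
      · simp [hq, hm]
    · simp [hq]
  rw [hstep, ← List.foldl_filter, ← List.foldl_map]

-- `xs.headD d` is Python's xs[0] (used only when xs has length 1)
theorem headD_eq_pyGetD_zero (xs : List String) (d : String) :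
    xs.headD d = PySem.List.pyGetD xs 0 d := by
  cases xs <;> simp [PySem.List.pyGetD_zero]

-- ===== VERDICT (by name: the statement is the Claim_ definition above) =====
theorem merge_rules_by_premise_py_spec : Claim_equal_merge_rules_by_premise_py := by
  intro rules _
  show merge_rules_by_premise_py rules = merge_rules_by_premise_py_alt rules
  simp only [merge_rules_by_premise_py, merge_rules_by_premise_py_alt]
  rw [foldl_pvParse_match, foldl_pvParse_match, PySem.List.foldl_append_singleton,
      List.nil_append]
  generalize List.filterMap pvParse rules = pairs
  have hnodup : (pairs.foldl
      (fun d pc => d.modify pc.1 [] (fun s => PySem.Set.add s pc.2)) PySem.Dict.empty).keys.Nodup :=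
    PySem.Dict.nodup_keys_foldl_modify_key pairs (fun pc => pc.1) []
      (fun _ pc => fun s => PySem.Set.add s pc.2) PySem.Dict.empty (by simp)
  have hkeys : (pairs.foldl
      (fun d pc => d.modify pc.1 [] (fun s => PySem.Set.add s pc.2)) PySem.Dict.empty).keys
      = PySem.Set.ofList (pairs.map (fun pc => pc.1)) := by
    rw [PySem.Dict.keys_foldl_modify_key pairs (fun pc => pc.1) []
      (fun _ pc => fun s => PySem.Set.add s pc.2) PySem.Dict.empty]
    simp [PySem.Set.update_nil_left]
  have hprem : pairs.foldl (fun ps pc => if pc.1 ∈ ps then ps else ps ++ [pc.1]) []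
      = PySem.Set.ofList (pairs.map (fun pc => pc.1)) := by
    have hstep : (fun (ps : List String) (pc : String × String) =>
          if pc.1 ∈ ps then ps else ps ++ [pc.1])
        = (fun ps pc => PySem.Set.add ps pc.1) := by
      funext ps pc
      rw [PySem.Set.add_eq_ite]
    rw [hstep, ← PySem.Set.update_map_eq_foldl_add pairs (fun pc => pc.1) [],
        PySem.Set.update_nil_left]
  rw [PySem.Dict.items_eq_map_keys _ hnodup [], List.foldl_map, hkeys, hprem]
  congr 1
  funext merged k
  rw [getD_group_foldl, inner_scan_eq, headD_eq_pyGetD_zero]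
  simp
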